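-- pv_equiv track=rewrite | github.com/SikaStar/IDM | examples/train_idm.py | filter_layers
-- ===== SOURCE A (Python) =====
-- def filter_layers(stage):
--     layer_names = ['conv', 'layer1', 'layer2', 'layer3', 'layer4', 'feat_bn']
--     ori_bn_names = []
--     idm_bn_names = []
--     for i in range(len(layer_names)):
--         if i < stage+1:
--             ori_bn_names.append(layer_names[i])
--         else:
--             idm_bn_names.append(layer_names[i])
--     return idm_bn_names
-- ===== SOURCE B (Python) =====
-- def filter_layers(stage):
--     layer_names = ['conv', 'layer1', 'layer2', 'layer3', 'layer4', 'feat_bn']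
--     return layer_names[max(stage + 1, 0):]
-- ===== Notes on version B (the rewrite author's own statement) =====
-- stated objective: simpler
-- what changed: Replaced the index loop with two accumulator lists by a direct clamped slice of the fixed layer-name list at the stage boundary.
import Mathlib
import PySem

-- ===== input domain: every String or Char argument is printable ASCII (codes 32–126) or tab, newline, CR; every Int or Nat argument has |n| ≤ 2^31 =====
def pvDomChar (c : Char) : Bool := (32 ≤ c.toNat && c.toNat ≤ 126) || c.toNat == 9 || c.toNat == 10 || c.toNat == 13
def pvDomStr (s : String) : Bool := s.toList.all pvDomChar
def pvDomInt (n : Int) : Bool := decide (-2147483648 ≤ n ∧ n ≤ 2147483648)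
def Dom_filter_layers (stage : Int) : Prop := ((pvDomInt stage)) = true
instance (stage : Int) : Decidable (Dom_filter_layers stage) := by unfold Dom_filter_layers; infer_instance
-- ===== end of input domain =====

-- B replaces A's loop-and-two-lists partition by a single clamped slice at the stage boundary (objective: simpler).


-- ===== PORT A =====
def filter_layers (stage : Int) : List String :=
  let layer_names : List String := ["conv", "layer1", "layer2", "layer3", "layer4", "feat_bn"]
  let r := (PySem.List.pyRange 0 ((layer_names.length : Int)) 1).foldl
    (fun (st : List String × List String) i =>
      if i < stage + 1 then (st.1 ++ [PySem.List.pyGetD layer_names i ""], st.2)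
      else (st.1, st.2 ++ [PySem.List.pyGetD layer_names i ""]))
    (([] : List String), ([] : List String))
  r.2

-- ===== PORT B =====
def filter_layers_alt (stage : Int) : List String :=
  let layer_names : List String := ["conv", "layer1", "layer2", "layer3", "layer4", "feat_bn"]
  PySem.List.slice layer_names (some (max (stage + 1) 0)) none

-- ===== PRECONDITION & SPEC =====
def Spec_filter_layers (stage : Int) (out : List String) : Prop := out = filter_layers_alt stage
instance (stage : Int) (out : List String) : Decidable (Spec_filter_layers stage out) := by unfold Spec_filter_layers; infer_instance

-- ===== CLAIM (what is proved, stated in full; the proofs are below) =====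
def Claim_equal_filter_layers : Prop := ∀ (stage : Int), Dom_filter_layers stage → Spec_filter_layers stage (filter_layers stage)

-- ===== LEMMAS AND PROOFS =====

-- ===== VERDICT (by name: the statement is the Claim_ definition above) =====
theorem filter_layers_spec : Claim_equal_filter_layers := by
  intro stage _
  unfold Spec_filter_layers filter_layers filter_layers_alt
  rcases lt_or_ge stage 0 with h | h
  · -- stage + 1 ≤ 0: A keeps every name in idm_bn_names; B slices from 0
    have hm : max (stage + 1) 0 = 0 := by omega
    simp [PySem.List.pyRange, PySem.List.pyGetD, PySem.List.pyGet?, PySem.List.pyIdx?, hm,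
      List.range_succ,
      (show ¬ ((0:Int) ≤ stage) by omega), (show ¬ ((1:Int) ≤ stage) by omega),
      (show ¬ ((2:Int) ≤ stage) by omega), (show ¬ ((3:Int) ≤ stage) by omega),
      (show ¬ ((4:Int) ≤ stage) by omega), (show ¬ ((5:Int) ≤ stage) by omega)]
  · rcases lt_or_ge stage 5 with h5 | h5
    · -- 0 ≤ stage < 5: finitely many cases
      interval_cases stage <;> decide
    · -- stage ≥ 5: A keeps nothing; B slices past the end
      have hm : max (stage + 1) 0 = stage + 1 := by omega
      rw [hm, PySem.List.slice_some_none]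
      have hc : PySem.List.clampIdx 6 (stage + 1) = 6 := by
        simp only [PySem.List.clampIdx]; split_ifs <;> omega
      simp [PySem.List.pyRange, PySem.List.pyGetD, PySem.List.pyGet?, PySem.List.pyIdx?,
        List.range_succ, hc,
        (show ((0:Int) ≤ stage) by omega), (show ((1:Int) ≤ stage) by omega),
        (show ((2:Int) ≤ stage) by omega), (show ((3:Int) ≤ stage) by omega),
        (show ((4:Int) ≤ stage) by omega), (show ((5:Int) ≤ stage) by omega)]
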